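-- pv_equiv track=rewrite | github.com/SeanFoongjt/CS4248-project | news-data-scraping/clean_metadata_mojibake.py | capitalize_after_prefix
-- ===== SOURCE A (Python) =====
-- def capitalize_after_prefix(text: str, prefix: str) -> str:
--     out = []
--     i = 0
--     while i < len(text):
--         if text.startswith(prefix, i) and i + len(prefix) < len(text):
--             nxt = text[i + len(prefix)]
--             if "a" <= nxt <= "z":
--                 out.append(prefix)
--                 out.append(nxt.upper())
--                 i += len(prefix) + 1
--                 continue
--         out.append(text[i])
--         i += 1
--     return "".join(out)
-- ===== SOURCE B (Python) =====
-- def capitalize_after_prefix(text: str, prefix: str) -> str: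
--     # Jump between occurrences with str.find instead of scanning char by char.
--     parts = []
--     i = 0
--     L = len(prefix)
--     n = len(text)
--     while True:
--         j = text.find(prefix, i)
--         if j == -1 or j + L >= n:
--             parts.append(text[i:])
--             return "".join(parts)
--         nxt = text[j + L]
--         if "a" <= nxt <= "z":
--             parts.append(text[i:j])
--             parts.append(prefix)
--             parts.append(nxt.upper())
--             i = j + L + 1
--         else:
--             parts.append(text[i:j + 1])
--             i = j + 1
-- ===== Notes on version B (the rewrite author's own statement) =====
-- stated objective: faster
-- what changed: A scans the text character by character, testing startswith at every index; B jumps between prefix occurrences with str.find, copying the untouched stretches as whole slices and resuming after each handled occurrence.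
import Mathlib
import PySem

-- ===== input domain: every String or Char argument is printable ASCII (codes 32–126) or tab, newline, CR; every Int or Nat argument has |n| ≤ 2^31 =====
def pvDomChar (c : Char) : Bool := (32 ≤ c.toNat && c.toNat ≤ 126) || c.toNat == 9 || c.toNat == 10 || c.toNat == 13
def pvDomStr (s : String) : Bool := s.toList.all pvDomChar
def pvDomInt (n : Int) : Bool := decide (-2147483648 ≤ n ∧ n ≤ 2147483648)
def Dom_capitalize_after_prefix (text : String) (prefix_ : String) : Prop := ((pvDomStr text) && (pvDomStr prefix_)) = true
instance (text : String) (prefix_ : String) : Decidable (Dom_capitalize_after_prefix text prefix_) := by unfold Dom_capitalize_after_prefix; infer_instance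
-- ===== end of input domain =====

-- B replaces A's interpreted char-by-char index scan by str.find jumps between prefix occurrences,
-- copying untouched stretches as slices (measured faster by a constant factor); same return value.

-- ===== PORT A =====
-- A's while loop over index i (fuel = len(text)+1 bounds the iteration count: i strictly increases); 'out' is the appended pieces ("".join of the appended pieces = their
-- concatenation, kept here as a flat List Char accumulator). text.startswith(prefix, i) with
-- 0 ≤ i is exactly 'prefix is a prefix of text[i:]' (PySem.Chars.startswith on the drop).
-- text[i] / text[i+len(prefix)] are guarded in range, so getD is exact there.
def capAgo (t p : List Char) (fuel : Nat) (i : Nat) (out : List Char) : List Char :=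
  match fuel with
  | 0 => out
  | fuel + 1 =>
  if i < t.length then
    if PySem.Chars.startswith (t.drop i) p ∧ i + p.length < t.length then
      -- nxt = text[i + len(prefix)], inlined
      if 'a' ≤ t.getD (i + p.length) ' ' ∧ t.getD (i + p.length) ' ' ≤ 'z' then
        capAgo t p fuel (i + p.length + 1) (out ++ p ++ [PySem.Chars.upperChar (t.getD (i + p.length) ' ')])
      else
        capAgo t p fuel (i + 1) (out ++ [t.getD i ' '])
    else
      capAgo t p fuel (i + 1) (out ++ [t.getD i ' '])
  else out

def capitalize_after_prefix (text : String) (prefix_ : String) : String :=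
  String.ofList (capAgo text.toList prefix_.toList (text.toList.length + 1) 0 [])

-- ===== PORT B =====
-- Source B's 'while True' loop: j = text.find(prefix, i); fuel = len(text)+1 bounds the iteration
-- count (i strictly increases each round), the 'return' branches never consume it in effect.
def capBgo (t p : List Char) (fuel : Nat) (i : Nat) (parts : List Char) : List Char :=
  match fuel with
  | 0 => parts
  | fuel + 1 =>
    -- j = text.find(prefix, i), inlined at each use
    if PySem.Chars.findFrom t p (i : Int) none = -1 ∨ (t.length : Int) ≤ PySem.Chars.findFrom t p (i : Int) none + (p.length : Int) then
      parts ++ t.drop i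
    else
      -- jn = j (nonnegative here); nxt = text[j + L], inlined
      if 'a' ≤ t.getD ((PySem.Chars.findFrom t p (i : Int) none).toNat + p.length) ' ' ∧ t.getD ((PySem.Chars.findFrom t p (i : Int) none).toNat + p.length) ' ' ≤ 'z' then
        capBgo t p fuel ((PySem.Chars.findFrom t p (i : Int) none).toNat + p.length + 1)
          (parts ++ PySem.List.slice t (some (i : Int)) (some (((PySem.Chars.findFrom t p (i : Int) none).toNat : Nat) : Int)) ++ p ++ [PySem.Chars.upperChar (t.getD ((PySem.Chars.findFrom t p (i : Int) none).toNat + p.length) ' ')])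
      else
        capBgo t p fuel ((PySem.Chars.findFrom t p (i : Int) none).toNat + 1)
          (parts ++ PySem.List.slice t (some (i : Int)) (some ((((PySem.Chars.findFrom t p (i : Int) none).toNat : Nat) : Int) + 1)))

def capitalize_after_prefix_alt (text : String) (prefix_ : String) : String :=
  String.ofList (capBgo text.toList prefix_.toList (text.toList.length + 1) 0 [])

-- ===== PRECONDITION & SPEC =====
def Spec_capitalize_after_prefix (text : String) (prefix_ : String) (out : String) : Prop := out = capitalize_after_prefix_alt text prefix_
instance (text : String) (prefix_ : String) (out : String) : Decidable (Spec_capitalize_after_prefix text prefix_ out) := by unfold Spec_capitalize_after_prefix; infer_instance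

-- ===== CLAIM (what is proved, stated in full; the proofs are below) =====
def Claim_equal_capitalize_after_prefix : Prop := ∀ (text : String) (prefix_ : String), Dom_capitalize_after_prefix text prefix_ → Spec_capitalize_after_prefix text prefix_ (capitalize_after_prefix text prefix_)

-- ===== LEMMAS AND PROOFS =====

-- accumulator lemmas
theorem capAgo_acc (t p : List Char) (fuel i : Nat) (out : List Char) :
    capAgo t p fuel i out = out ++ capAgo t p fuel i [] := by
  induction fuel generalizing i out with
  | zero => simp [capAgo]
  | succ n ih =>
    conv_lhs => rw [capAgo]
    conv_rhs => rw [capAgo]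
    split_ifs with h1 h2 h3
    · rw [ih]; conv_rhs => rw [ih]
      simp
    · rw [ih]; conv_rhs => rw [ih]
      simp
    · rw [ih]; conv_rhs => rw [ih]
      simp
    · simp

theorem capBgo_acc (t p : List Char) (fuel i : Nat) (parts : List Char) :
    capBgo t p fuel i parts = parts ++ capBgo t p fuel i [] := by
  induction fuel generalizing i parts with
  | zero => simp [capBgo]
  | succ n ih =>
    conv_lhs => rw [capBgo]
    conv_rhs => rw [capBgo]
    split_ifs with h1 h2
    · rfl
    · rw [ih]; conv_rhs => rw [ih]
      simp
    · rw [ih]; conv_rhs => rw [ih]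
      simp

-- find points at the stated first occurrence (uniqueness of the first occurrence)
theorem find_eq_of_first (cs sub : List Char) (m : Nat)
    (hm : sub <+: cs.drop m) (hmin : ∀ k < m, ¬ sub <+: cs.drop k) :
    PySem.Chars.find cs sub = (m : Int) := by
  have hnn : 0 ≤ PySem.Chars.find cs sub := by
    rw [PySem.Chars.find_nonneg_iff]
    rw [← PySem.Chars.isIn_iff_infix, ← PySem.Chars.exists_prefix_drop_iff_isIn]
    exact ⟨m, hm⟩
  obtain ⟨h1, h2⟩ := PySem.Chars.find_spec (s := cs) (sub := sub) hnn
  have : (PySem.Chars.find cs sub).toNat = m := by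
    rcases Nat.lt_trichotomy (PySem.Chars.find cs sub).toNat m with h | h | h
    · exact absurd h1 (hmin _ h)
    · exact h
    · exact absurd hm (h2 m h)
  omega

theorem findFrom_eq_of_prefix (t p : List Char) (i : Nat) (hi : i ≤ t.length)
    (h : p <+: t.drop i) : PySem.Chars.findFrom t p (i : Int) none = (i : Int) := by
  rw [PySem.Chars.findFrom_natCast t p i hi]
  have h0 : PySem.Chars.find (t.drop i) p = ((0 : Nat) : Int) := by
    apply find_eq_of_first
    · simpa using h
    · omega
  rw [h0]
  norm_num

theorem findFrom_step (t p : List Char) (i : Nat) (hi : i < t.length)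
    (h : ¬ p <+: t.drop i) :
    PySem.Chars.findFrom t p (i : Int) none = PySem.Chars.findFrom t p ((i : Nat) + 1 : Nat) none := by
  have hiff : ∀ (s : List Char), (p <:+: s) ↔ ∃ j, p <+: s.drop j := fun s => by
    rw [← PySem.Chars.isIn_iff_infix, ← PySem.Chars.exists_prefix_drop_iff_isIn]
  rw [PySem.Chars.findFrom_natCast t p i (le_of_lt hi), PySem.Chars.findFrom_natCast t p (i + 1) hi]
  by_cases hfe : PySem.Chars.find (t.drop (i + 1)) p = -1
  · have hni : PySem.Chars.find (t.drop i) p = -1 := by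
      rw [PySem.Chars.find_eq_neg_one_iff] at hfe ⊢
      intro hinf
      apply hfe
      obtain ⟨j, hj⟩ := (hiff _).1 hinf
      cases j with
      | zero => simp at hj; exact absurd hj h
      | succ k =>
        apply (hiff _).2
        refine ⟨k, ?_⟩
        rw [List.drop_drop] at hj ⊢
        have he : i + 1 + k = i + (k + 1) := by omega
        rw [he]
        exact hj
    rw [hfe, hni]
    norm_num
  · have hnn : 0 ≤ PySem.Chars.find (t.drop (i + 1)) p := by
      have := PySem.Chars.neg_one_le_find (s := t.drop (i + 1)) (sub := p)
      omega
    obtain ⟨hpre, hmin⟩ := PySem.Chars.find_spec hnn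
    have h1 : PySem.Chars.find (t.drop i) p
        = (((PySem.Chars.find (t.drop (i + 1)) p).toNat + 1 : Nat) : Int) := by
      apply find_eq_of_first
      · rw [List.drop_drop]
        rw [List.drop_drop] at hpre
        have he : i + ((PySem.Chars.find (t.drop (i + 1)) p).toNat + 1)
            = i + 1 + (PySem.Chars.find (t.drop (i + 1)) p).toNat := by omega
        rw [he]
        exact hpre
      · intro k hk
        cases k with
        | zero => simpa using h
        | succ k' =>
          intro hc
          apply hmin k' (by omega)
          rw [List.drop_drop] at hc ⊢
          have he : i + 1 + k' = i + (k' + 1) := by omega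
          rw [he]
          exact hc
    rw [h1]
    have h2 : PySem.Chars.find (t.drop (i + 1)) p
        = ((PySem.Chars.find (t.drop (i + 1)) p).toNat : Int) := by omega
    rw [if_neg (by omega), if_neg hfe]
    push_cast
    omega

-- once too little room is left for prefix+1, A only copies characters
theorem capAgo_tail (t p : List Char) (fuel i : Nat) (h1 : t.length - i < fuel)
    (h2 : t.length ≤ i + p.length) :
    capAgo t p fuel i [] = t.drop i := by
  induction fuel generalizing i with
  | zero => omega
  | succ n ih =>
    conv_lhs => rw [capAgo]
    by_cases hl : i < t.length
    · rw [if_pos hl, if_neg (by rintro ⟨-, hb⟩; omega)]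
      rw [capAgo_acc, ih (i + 1) (by omega) (by omega)]
      rw [List.drop_eq_getElem_cons hl]
      simp [List.getElem?_eq_getElem hl]
    · rw [if_neg hl]
      rw [List.drop_of_length_le (by omega)]

-- enough fuel: the result does not depend on the exact amount
theorem capBgo_fuel (t p : List Char) (f1 f2 i : Nat) (hi : i ≤ t.length)
    (h1 : t.length - i < f1) (h2 : t.length - i < f2) :
    capBgo t p f1 i [] = capBgo t p f2 i [] := by
  induction f1 generalizing f2 i with
  | zero => omega
  | succ a ih =>
    cases f2 with
    | zero => omega
    | succ b =>
      conv_lhs => rw [capBgo]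
      conv_rhs => rw [capBgo]
      split_ifs with hc hlow
      · rfl
      all_goals
        push Not at hc
        obtain ⟨hji, hpre, hmin⟩ := PySem.Chars.findFrom_natCast_spec t p i hi hc.1
        have hb1 := hc.2
        rw [capBgo_acc t p a, capBgo_acc t p b]
        congr 1
        exact ih _ _ (by omega) (by omega) (by omega)

theorem slice_cons (t : List Char) (i j : Nat) (hij : i < j) (hil : i < t.length) :
    PySem.List.slice t (some (i : Int)) (some (j : Int))
      = t.getD i ' ' :: PySem.List.slice t (some ((i + 1 : Nat) : Int)) (some (j : Int)) := by
  rw [PySem.List.slice_natCast, PySem.List.slice_natCast]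
  rw [List.drop_eq_getElem_cons hil]
  rw [show j - i = (j - (i + 1)) + 1 by omega, List.take_succ_cons]
  simp [List.getD, List.getElem?_eq_getElem hil]

theorem main_eq (t p : List Char) (fuel i : Nat) (hi : i ≤ t.length)
    (hf : t.length - i < fuel) :
    capAgo t p fuel i [] = capBgo t p fuel i [] := by
  induction fuel generalizing i with
  | zero => omega
  | succ f ih =>
    by_cases hsw : p <+: t.drop i
    · have hj : PySem.Chars.findFrom t p (i : Int) none = (i : Int) := findFrom_eq_of_prefix t p i hi hsw
      by_cases hroom : i + p.length < t.length
      · -- a genuine match with room: both produce prefix + uppercased char and continue at i+L+1,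
        -- or copy one char (A) = slice of length 1 (B) when next char is not lowercase
        conv_rhs => rw [capBgo]
        have hcond : ¬(PySem.Chars.findFrom t p (i : Int) none = -1 ∨
            (t.length : Int) ≤ PySem.Chars.findFrom t p (i : Int) none + (p.length : Int)) := by
          rw [hj]; push_cast
          rintro (h1 | h2)
          · exact h1
          · omega
        rw [if_neg hcond]
        conv_lhs => rw [capAgo]
        rw [if_pos (show i < t.length by omega), if_pos ⟨(PySem.Chars.startswith_iff _ _).2 hsw, hroom⟩]
        rw [hj]
        simp only [Int.toNat_natCast]
        have hsl0 : PySem.List.slice t (some (i : Int)) (some (i : Int)) = [] := by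
          rw [PySem.List.slice_natCast]
          simp
        split_ifs with hlow
        · rw [capAgo_acc, capBgo_acc, hsl0]
          rw [ih (i + p.length + 1) (by omega) (by omega)]
          simp
        · rw [capAgo_acc, capBgo_acc]
          rw [show ((i : Int) + 1) = ((i + 1 : Nat) : Int) by push_cast; ring]
          rw [slice_cons t i (i + 1) (by omega) (by omega)]
          have hsl0' : PySem.List.slice t (some ((i + 1 : Nat) : Int)) (some ((i + 1 : Nat) : Int)) = [] := by
            rw [PySem.List.slice_natCast]
            simp
          rw [hsl0', ih (i + 1) (by omega) (by omega)]
      · -- match but no room for a following char: A copies the rest, B returns text[i:]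
        conv_rhs => rw [capBgo]
        rw [if_pos (by right; rw [hj]; omega)]
        rw [capAgo_tail t p (f + 1) i (by omega) (by omega)]
        simp
    · -- no match at i: A copies text[i]; B's find skips position i
      by_cases hl : i < t.length
      · have hstep := findFrom_step t p i hl hsw
        conv_lhs => rw [capAgo]
        rw [if_pos hl, if_neg (by rintro ⟨ha, -⟩; exact hsw ((PySem.Chars.startswith_iff _ _).1 ha))]
        rw [capAgo_acc, ih (i + 1) (by omega) (by omega)]
        cases f with
        | zero => omega
        | succ f' =>
          conv_rhs => rw [capBgo]
          conv_lhs => rw [capBgo]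
          rw [hstep]
          by_cases hc : PySem.Chars.findFrom t p ((i + 1 : Nat) : Int) none = -1 ∨
              (t.length : Int) ≤ PySem.Chars.findFrom t p ((i + 1 : Nat) : Int) none + (p.length : Int)
          · rw [if_pos hc, if_pos hc]
            rw [List.drop_eq_getElem_cons hl]
            simp [List.getElem?_eq_getElem hl]
          · rw [if_neg hc, if_neg hc]
            push Not at hc
            obtain ⟨hji, hpre, hmin⟩ := PySem.Chars.findFrom_natCast_spec t p (i + 1) (by omega) hc.1
            have hb1 := hc.2
            have hijn : i + 1 ≤ (PySem.Chars.findFrom t p ((i + 1 : Nat) : Int) none).toNat := by omega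
            have hjnl : (PySem.Chars.findFrom t p ((i + 1 : Nat) : Int) none).toNat + p.length < t.length := by
              omega
            split_ifs with hlow
            · rw [capBgo_acc t p f', capBgo_acc t p (f' + 1)]
              rw [capBgo_fuel t p f' (f' + 1) _ (by omega) (by omega) (by omega)]
              rw [slice_cons t i _ (by omega) hl]
              simp
            · rw [capBgo_acc t p f', capBgo_acc t p (f' + 1)]
              rw [capBgo_fuel t p f' (f' + 1) _ (by omega) (by omega) (by omega)]
              rw [show ((((PySem.Chars.findFrom t p ((i + 1 : Nat) : Int) none).toNat : Nat) : Int) + 1)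
                    = (((PySem.Chars.findFrom t p ((i + 1 : Nat) : Int) none).toNat + 1 : Nat) : Int) by
                  push_cast; ring]
              rw [slice_cons t i _ (by omega) hl]
              simp
      · have hie : i = t.length := by omega
        conv_rhs => rw [capBgo]
        have hjn : PySem.Chars.findFrom t p (i : Int) none = -1 := by
          rw [PySem.Chars.findFrom_natCast_eq_neg_one_iff t p i (by omega)]
          intro hinf
          subst hie
          simp at hinf
          subst hinf
          exact hsw (by simp)
        rw [if_pos (Or.inl hjn)]
        conv_lhs => rw [capAgo]
        rw [if_neg hl, List.drop_of_length_le (by omega)]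
        simp

-- ===== VERDICT (by name: the statement is the Claim_ definition above) =====
theorem capitalize_after_prefix_spec : Claim_equal_capitalize_after_prefix := by
  intro text prefix_ _
  unfold Spec_capitalize_after_prefix capitalize_after_prefix capitalize_after_prefix_alt
  rw [main_eq text.toList prefix_.toList (text.toList.length + 1) 0 (by omega) (by omega)]
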